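-- pv_equiv track=rewrite | github.com/ssmisya/AdaReasoner | tool_server/tool_workers/offline_workers/turn_into_text_map.py | generate_text_map
-- ===== SOURCE A (Python) =====
-- def generate_text_map(grid_size, start, goal, obstacles):
--     """
--     生成文本地图表示
--     @ 表示起点
--     * 表示终点
--     # 表示障碍物
--     _ 表示空白区域
--     """
--     width, height = grid_size
--
--     # 创建表头行
--     header_row = "| |"
--     for col in range(1, width + 1):
--         header_row += f" Col {col} |"
--
--     # 创建网格
--     grid_rows = []
--     grid_rows.append(header_row)
--
--     # 构建障碍物集合以加速查找
--     obstacles_set = set(obstacles)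
--
--     for y in range(height):
--         row = f"| Row {y+1} |"
--         for x in range(width):
--             pos = (x, y)
--             if pos == start:
--                 row += " @ |"
--             elif pos == goal:
--                 row += " * |"
--             elif pos in obstacles_set:
--                 row += " # |"
--             else:
--                 row += " _ |"
--         grid_rows.append(row)
--
--     # 合并为完整文本地图
--     text_map = "\n".join(grid_rows)
--     return text_map
-- ===== SOURCE B (Python) =====
-- def generate_text_map(grid_size, start, goal, obstacles):
--     """
--     生成文本地图表示（散点写入法）：先分配全 '_' 的二维网格，
--     把标记散点写入（障碍物 -> 终点 -> 起点，后写者优先），最后一次性渲染。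
--     @ 表示起点, * 表示终点, # 表示障碍物, _ 表示空白区域
--     """
--     width, height = grid_size
--     cells = [["_"] * width for _ in range(height)]
--
--     def put(pos, ch):
--         x, y = pos
--         if 0 <= x < width and 0 <= y < height:
--             cells[y][x] = ch
--
--     for obs in obstacles:
--         put(obs, "#")
--     put(goal, "*")
--     put(start, "@")
--
--     lines = ["| |" + "".join(f" Col {c} |" for c in range(1, width + 1))]
--     for y, row in enumerate(cells):
--         lines.append(f"| Row {y + 1} |" + "".join(f" {ch} |" for ch in row))
--     return "\n".join(lines)
-- ===== Notes on version B (the rewrite author's own statement) =====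
-- stated objective: alternative
-- what changed: B replaces A's per-cell four-way priority test with a scatter-write algorithm: it allocates a 2D grid pre-filled with '_', writes only the markers into it with bounds-checked point writes (obstacles, then goal, then start, so the last writer reproduces A's priority), and then renders the finished grid in a marker-free pass with no conditionals or lookups per cell.
import Mathlib
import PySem

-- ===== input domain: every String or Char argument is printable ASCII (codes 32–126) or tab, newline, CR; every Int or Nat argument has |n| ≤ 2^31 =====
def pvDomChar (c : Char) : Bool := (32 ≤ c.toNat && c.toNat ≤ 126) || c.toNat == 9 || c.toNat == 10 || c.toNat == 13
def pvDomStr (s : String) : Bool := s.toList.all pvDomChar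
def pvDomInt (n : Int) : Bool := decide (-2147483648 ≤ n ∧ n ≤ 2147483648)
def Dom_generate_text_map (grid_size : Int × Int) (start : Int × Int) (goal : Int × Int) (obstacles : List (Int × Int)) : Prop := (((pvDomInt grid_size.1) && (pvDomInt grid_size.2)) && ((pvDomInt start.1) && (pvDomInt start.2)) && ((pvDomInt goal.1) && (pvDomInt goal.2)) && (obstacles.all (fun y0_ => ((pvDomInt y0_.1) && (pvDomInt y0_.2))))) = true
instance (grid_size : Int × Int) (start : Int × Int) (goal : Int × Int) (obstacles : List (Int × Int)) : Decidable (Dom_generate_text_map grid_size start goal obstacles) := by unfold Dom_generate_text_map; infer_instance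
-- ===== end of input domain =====

-- B replaces A's per-cell priority branching by a scatter-write algorithm: allocate an all-'_'
-- 2D grid, point-write the markers (obstacles, then goal, then start), then render it in a
-- marker-free pass; structurally different, same cost ("alternative").

-- ===== PORT A =====
def generate_text_map (grid_size : Int × Int) (start : Int × Int) (goal : Int × Int) (obstacles : List (Int × Int)) : String :=
  let width := grid_size.1
  let height := grid_size.2
  let header_row := (PySem.List.pyRange 1 (width + 1) 1).foldl
      (fun acc c => acc ++ (" Col " ++ PySem.Int.toStr c ++ " |")) "| |"
  let obstacles_set : PySem.Set (Int × Int) := PySem.Set.ofList obstacles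
  let grid_rows := (PySem.List.pyRange 0 height 1).foldl
      (fun rows y =>
        let row := (PySem.List.pyRange 0 width 1).foldl
          (fun row x =>
            let pos := (x, y)
            if pos == start then row ++ " @ |"
            else if pos == goal then row ++ " * |"
            else if obstacles_set.contains pos then row ++ " # |"
            else row ++ " _ |")
          ("| Row " ++ PySem.Int.toStr (y + 1) ++ " |")
        rows ++ [row]) [header_row]
  PySem.Str.join "\n" grid_rows

-- ===== PORT B =====
-- the bounds-checked point write `put(pos, ch)` of Source B (a write past the bounds is skipped,
-- so `.toNat` below is only reached on 0 ≤ pos.1 < w, 0 ≤ pos.2 < h — exact)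
def gtmPut (w h : Int) (ch : String) (cells : List (List String)) (pos : Int × Int) : List (List String) :=
  if 0 ≤ pos.1 ∧ pos.1 < w ∧ 0 ≤ pos.2 ∧ pos.2 < h then
    cells.set pos.2.toNat ((cells.getD pos.2.toNat []).set pos.1.toNat ch)
  else cells

def generate_text_map_alt (grid_size : Int × Int) (start : Int × Int) (goal : Int × Int) (obstacles : List (Int × Int)) : String :=
  let width := grid_size.1
  let height := grid_size.2
  let cells0 := List.replicate height.toNat (List.replicate width.toNat "_")
  let cells1 := obstacles.foldl (gtmPut width height "#") cells0
  let cells2 := gtmPut width height "@" (gtmPut width height "*" cells1 goal) start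
  let lines :=
    ("| |" ++ PySem.Str.join "" ((PySem.List.pyRange 1 (width + 1) 1).map
        (fun c => " Col " ++ PySem.Int.toStr c ++ " |"))) ::
      (PySem.List.enumerate cells2 0).map (fun yr =>
        ("| Row " ++ PySem.Int.toStr (yr.1 + 1) ++ " |") ++
          PySem.Str.join "" (yr.2.map (fun ch => " " ++ ch ++ " |")))
  PySem.Str.join "\n" lines

-- ===== PRECONDITION & SPEC =====
def Spec_generate_text_map (grid_size : Int × Int) (start : Int × Int) (goal : Int × Int) (obstacles : List (Int × Int)) (out : String) : Prop := out = generate_text_map_alt grid_size start goal obstacles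
instance (grid_size : Int × Int) (start : Int × Int) (goal : Int × Int) (obstacles : List (Int × Int)) (out : String) : Decidable (Spec_generate_text_map grid_size start goal obstacles out) := by unfold Spec_generate_text_map; infer_instance

-- ===== CLAIM (what is proved, stated in full; the proofs are below) =====
def Claim_equal_generate_text_map : Prop := ∀ (grid_size : Int × Int) (start : Int × Int) (goal : Int × Int) (obstacles : List (Int × Int)), Dom_generate_text_map grid_size start goal obstacles → Spec_generate_text_map grid_size start goal obstacles (generate_text_map grid_size start goal obstacles)

-- ===== LEMMAS AND PROOFS =====

-- "".join over a list of strings concatenates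
theorem pv_cjoin_cons (p : List Char) (rest : List (List Char)) :
    PySem.Chars.join [] (p :: rest) = p ++ PySem.Chars.join [] rest := by
  cases rest with
  | nil => simp [PySem.Chars.join_singleton, PySem.Chars.join_nil]
  | cons q r => simp [PySem.Chars.join_cons_cons]

theorem pv_join_cons (a : String) (l : List String) :
    PySem.Str.join "" (a :: l) = a ++ PySem.Str.join "" l := by
  apply String.toList_inj.mp
  simp [PySem.Str.toList_join, String.toList_append, pv_cjoin_cons]

theorem pv_join_nil : PySem.Str.join "" ([] : List String) = "" := by
  apply String.toList_inj.mp
  simp [PySem.Str.toList_join, PySem.Chars.join_nil]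

-- an append-accumulating string loop is prefix ++ "".join(map)
theorem pv_foldl_str (l : List Int) (f : Int → String) (p : String) :
    l.foldl (fun acc c => acc ++ f c) p = p ++ PySem.Str.join "" (l.map f) := by
  induction l generalizing p with
  | nil => simp [pv_join_nil]
  | cons a t ih =>
      simp only [List.foldl_cons, List.map_cons, pv_join_cons, ih]
      apply String.toList_inj.mp
      simp [String.toList_append]

-- a .append loop is init ++ map
theorem pv_foldl_snoc (l : List Int) (g : Int → String) (init : List String) :
    l.foldl (fun rows y => rows ++ [g y]) init = init ++ l.map g := by
  induction l generalizing init with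
  | nil => simp
  | cons a t ih => simp [ih]

-- getD after set (no such lemma found in Mathlib/PySem)
theorem pv_getD_set {α : Type} (l : List α) (i j : Nat) (a d : α) :
    (l.set i a).getD j d = if i = j ∧ i < l.length then a else l.getD j d := by
  simp only [List.getD_eq_getElem?_getD, List.getElem?_set]
  split_ifs with h1 h2 h3 <;> simp_all <;> omega

-- the cell at column x, row y of a grid (default '_')
def pvCell (cells : List (List String)) (x y : Nat) : String := (cells.getD y []).getD x "_"

-- well-formed w×h grid
def pvShape (w h : Nat) (cells : List (List String)) : Prop :=
  cells.length = h ∧ ∀ r ∈ cells, r.length = w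

theorem pv_shape_zero (w h : Int) :
    pvShape w.toNat h.toNat (List.replicate h.toNat (List.replicate w.toNat "_")) := by
  constructor
  · simp
  · intro r hr
    simp [List.eq_of_mem_replicate hr]

theorem pv_shape_put (w h : Int) (ch : String) (cells : List (List String)) (pos : Int × Int)
    (hs : pvShape w.toNat h.toNat cells) : pvShape w.toNat h.toNat (gtmPut w h ch cells pos) := by
  obtain ⟨hlen, hrow⟩ := hs
  unfold gtmPut
  split
  · next hb =>
    refine ⟨by simp [hlen], ?_⟩
    intro r hr
    rcases List.mem_or_eq_of_mem_set hr with h | h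
    · exact hrow r h
    · have hy : pos.2.toNat < cells.length := by omega
      have hget : cells.getD pos.2.toNat [] = cells[pos.2.toNat] := by
        simp [List.getD_eq_getElem?_getD, List.getElem?_eq_getElem hy]
      subst h
      rw [List.length_set, hget]
      exact hrow _ (List.getElem_mem hy)
  · exact ⟨hlen, hrow⟩

theorem pv_shape_fold (w h : Int) (l : List (Int × Int)) (cells : List (List String))
    (hs : pvShape w.toNat h.toNat cells) :
    pvShape w.toNat h.toNat (l.foldl (gtmPut w h "#") cells) := by
  induction l generalizing cells with
  | nil => exact hs
  | cons o t ih => exact ih _ (pv_shape_put w h "#" cells o hs)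

-- reading a cell after a bounds-checked point write
theorem pv_cell_put (w h : Int) (ch : String) (cells : List (List String)) (pos : Int × Int)
    (x y : Nat) (hx : x < w.toNat) (hy : y < h.toNat) (hs : pvShape w.toNat h.toNat cells) :
    pvCell (gtmPut w h ch cells pos) x y =
      if pos = ((x : Int), (y : Int)) then ch else pvCell cells x y := by
  obtain ⟨hlen, hrow⟩ := hs
  unfold gtmPut pvCell
  split
  · next hb =>
    rw [pv_getD_set]
    have hy2 : pos.2.toNat < cells.length := by omega
    by_cases hyy : pos.2.toNat = y
    · have hget : cells.getD pos.2.toNat [] = cells[pos.2.toNat] := by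
        simp [List.getD_eq_getElem?_getD, List.getElem?_eq_getElem hy2]
      have hrl : (cells.getD pos.2.toNat []).length = w.toNat := by
        rw [hget]; exact hrow _ (List.getElem_mem hy2)
      rw [if_pos ⟨hyy, hy2⟩, pv_getD_set, hrl]
      by_cases hxx : pos.1.toNat = x
      · have heq : pos = ((x : Int), (y : Int)) := by
          obtain ⟨p1, p2⟩ := pos
          simp only [Prod.mk.injEq]
          simp only at hxx hyy
          obtain ⟨b1, b2, b3, b4⟩ := hb
          simp only at b1 b2 b3 b4
          omega
        rw [if_pos ⟨hxx, by omega⟩, if_pos heq]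
      · have hne : pos ≠ ((x : Int), (y : Int)) := by
          intro h
          exact hxx (by rw [h]; simp)
        rw [if_neg (by tauto), if_neg hne, hyy]
    · have hne : pos ≠ ((x : Int), (y : Int)) := by
        intro h
        exact hyy (by rw [h]; simp)
      rw [if_neg (by tauto), if_neg hne]
  · next hb =>
    have hne : pos ≠ ((x : Int), (y : Int)) := by
      intro h
      apply hb
      rw [h]
      refine ⟨by omega, by omega, by omega, by omega⟩
    rw [if_neg hne]

theorem pv_cell_zero (w h : Int) (x y : Nat) :
    pvCell (List.replicate h.toNat (List.replicate w.toNat "_")) x y = "_" := by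
  unfold pvCell
  simp only [List.getD_eq_getElem?_getD, List.getElem?_replicate]
  split_ifs <;> simp

theorem pv_cell_fold (w h : Int) (l : List (Int × Int)) (cells : List (List String))
    (x y : Nat) (hx : x < w.toNat) (hy : y < h.toNat) (hs : pvShape w.toNat h.toNat cells) :
    pvCell (l.foldl (gtmPut w h "#") cells) x y =
      if ((x : Int), (y : Int)) ∈ l then "#" else pvCell cells x y := by
  induction l generalizing cells with
  | nil => simp
  | cons o t ih =>
    simp only [List.foldl_cons, List.mem_cons]
    rw [ih _ (pv_shape_put w h "#" cells o hs), pv_cell_put w h "#" cells o x y hx hy hs]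
    by_cases h1 : ((x : Int), (y : Int)) ∈ t <;> by_cases h2 : o = ((x : Int), (y : Int)) <;>
      simp [h1, h2, eq_comm]

-- the finished marker grid reads back exactly A's priority chain
set_option maxRecDepth 10000 in
theorem pv_cell_all (w h : Int) (start goal : Int × Int) (obstacles : List (Int × Int))
    (x y : Nat) (hx : x < w.toNat) (hy : y < h.toNat) :
    pvCell (gtmPut w h "@" (gtmPut w h "*"
        (obstacles.foldl (gtmPut w h "#")
          (List.replicate h.toNat (List.replicate w.toNat "_"))) goal) start) x y =
      if (((x : Int), (y : Int)) : Int × Int) == start then "@"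
      else if (((x : Int), (y : Int)) : Int × Int) == goal then "*"
      else if (PySem.Set.ofList obstacles).contains ((x : Int), (y : Int)) then "#"
      else "_" := by
  have hs0 := pv_shape_zero w h
  have hs1 := pv_shape_fold w h obstacles _ hs0
  have hs2 := pv_shape_put w h "*" _ goal hs1
  rw [pv_cell_put w h "@" _ start x y hx hy hs2,
      pv_cell_put w h "*" _ goal x y hx hy hs1,
      pv_cell_fold w h obstacles _ x y hx hy hs0, pv_cell_zero]
  have hc : ((PySem.Set.ofList obstacles).contains ((x : Int), (y : Int)) = true) ↔
      ((x : Int), (y : Int)) ∈ obstacles := by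
    simp [PySem.Set.contains, PySem.Set.mem_ofList]
  simp only [beq_iff_eq, hc]
  simp only [eq_comm]

-- any list is the range-indexed map of its own getD
theorem pv_list_eta (r : List String) :
    (List.range r.length).map (fun x => r.getD x "_") = r := by
  apply List.ext_getElem
  · simp
  · intro i h1 h2
    simp [List.getD_eq_getElem?_getD, List.getElem?_eq_getElem h2]

-- a map over enumerate is a map over indices
theorem pv_enum_map (l : List (List String)) (g : Int × List String → String) (s : Int) :
    (PySem.List.enumerate l s).map g =
      (List.range l.length).map (fun k : Nat => g (s + (k : Int), l.getD k [])) := by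
  induction l generalizing s with
  | nil => simp [PySem.List.enumerate]
  | cons a t ih =>
    rw [PySem.List.enumerate_cons, List.map_cons, ih (s + 1)]
    simp only [List.length_cons]
    rw [show List.range (t.length + 1) = 0 :: (List.range t.length).map (· + 1) from by
          simpa using List.range_succ_eq_map (n := t.length),
        List.map_cons, List.map_map]
    simp only [Nat.cast_zero, add_zero, List.getD_cons_zero]
    congr 1
    apply List.map_congr_left
    intro k _
    simp only [Function.comp_apply, List.getD_cons_succ]
    congr 1
    simp only [Prod.mk.injEq]
    refine ⟨by push_cast; ring, trivial⟩

-- A's inner row loop as prefix ++ "".join(map of the if-chain)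
theorem pv_row_if (l : List Int) (start goal : Int × Int) (obstacles : List (Int × Int))
    (y : Int) (p : String) :
    l.foldl (fun row x =>
        if ((x, y) : Int × Int) == start then row ++ " @ |"
        else if ((x, y) : Int × Int) == goal then row ++ " * |"
        else if (PySem.Set.ofList obstacles).contains (x, y) then row ++ " # |"
        else row ++ " _ |") p =
      p ++ PySem.Str.join "" (l.map (fun x =>
        if ((x, y) : Int × Int) == start then " @ |"
        else if ((x, y) : Int × Int) == goal then " * |"
        else if (PySem.Set.ofList obstacles).contains (x, y) then " # |"
        else " _ |")) := by
  have hstep : (fun (row : String) (x : Int) =>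
        if ((x, y) : Int × Int) == start then row ++ " @ |"
        else if ((x, y) : Int × Int) == goal then row ++ " * |"
        else if (PySem.Set.ofList obstacles).contains (x, y) then row ++ " # |"
        else row ++ " _ |") =
      (fun (row : String) (x : Int) => row ++
        (if ((x, y) : Int × Int) == start then " @ |"
         else if ((x, y) : Int × Int) == goal then " * |"
         else if (PySem.Set.ofList obstacles).contains (x, y) then " # |"
         else " _ |")) := by
    funext row x
    split_ifs <;> rfl
  rw [hstep, pv_foldl_str]

-- ===== VERDICT (by name: the statement is the Claim_ definition above) =====
theorem generate_text_map_spec : Claim_equal_generate_text_map := by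
  intro gs start goal obstacles _
  unfold Spec_generate_text_map generate_text_map generate_text_map_alt
  simp only [pv_foldl_snoc, pv_row_if, List.singleton_append, pv_foldl_str,
    PySem.List.pyRange_one, Int.sub_zero, List.map_map]
  set C := gtmPut gs.1 gs.2 "@" (gtmPut gs.1 gs.2 "*"
      (obstacles.foldl (gtmPut gs.1 gs.2 "#")
        (List.replicate gs.2.toNat (List.replicate gs.1.toNat "_"))) goal) start with hC
  have hshape : pvShape gs.1.toNat gs.2.toNat C := by
    rw [hC]
    exact pv_shape_put _ _ _ _ _ (pv_shape_put _ _ _ _ _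
      (pv_shape_fold _ _ _ _ (pv_shape_zero _ _)))
  have hcell : ∀ (x k : Nat), x < gs.1.toNat → k < gs.2.toNat →
      pvCell C x k =
        (if (((x : Int), (k : Int)) : Int × Int) == start then "@"
         else if (((x : Int), (k : Int)) : Int × Int) == goal then "*"
         else if (PySem.Set.ofList obstacles).contains ((x : Int), (k : Int)) then "#"
         else "_") := by
    intro x k hx hk
    rw [hC]
    exact pv_cell_all gs.1 gs.2 start goal obstacles x k hx hk
  congr 1
  rw [List.cons.injEq]
  refine ⟨rfl, ?_⟩
  rw [pv_enum_map, hshape.1]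
  apply List.map_congr_left
  intro k hk
  have hk' : k < gs.2.toNat := List.mem_range.mp hk
  simp only [Function.comp_apply, zero_add]
  congr 1
  -- the joined cell lists of row k agree
  have hkl : k < C.length := by rw [hshape.1]; exact hk'
  have hgd : C.getD k [] = C[k] := by
    simp [List.getD_eq_getElem?_getD, List.getElem?_eq_getElem hkl]
  have hrl : (C.getD k []).length = gs.1.toNat := by
    rw [hgd]
    exact hshape.2 _ (List.getElem_mem hkl)
  congr 1
  conv_rhs => rw [← pv_list_eta (C.getD k []), hrl, List.map_map]
  apply List.map_congr_left
  intro x hx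
  have hx' : x < gs.1.toNat := List.mem_range.mp hx
  simp only [Function.comp_apply]
  rw [show (C.getD k []).getD x "_" = pvCell C x k from rfl, hcell x k hx' hk']
  split_ifs <;> decide
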